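-- pv_equiv track=rewrite | github.com/adampolak/first-fit | runs/results_numcolors/gen_389/original.py | _assemble_from_blocks
-- ===== SOURCE A (Python) =====
-- def _assemble_from_blocks(blocks, interleave=False, reverse_order=False, round_seed=0):
--     """Flatten blocks into S, optionally interleaving. round_seed adds deterministic rotation."""
--     if not interleave:
--         if reverse_order:
--             blocks = list(reversed(blocks))
--         S = []
--         for blk in blocks:
--             S.extend(blk)
--         return S
--
--     # Interleave across blocks with a deterministic per-round rotation
--     maxlen = max((len(b) for b in blocks), default=0)
--     order = list(range(len(blocks)))
--     if reverse_order:
--         order = list(reversed(order))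
--     # rotate order deterministically by round_seed mod len(order)
--     if order:
--         krot = int(round_seed) % len(order)
--         order = order[krot:] + order[:krot]
--
--     S = []
--     for i in range(maxlen):
--         for idx in order:
--             blk = blocks[idx]
--             if i < len(blk):
--                 S.append(blk[i])
--     return S
-- ===== SOURCE B (Python) =====
-- def _assemble_from_blocks(blocks, interleave=False, reverse_order=False, round_seed=0):
--     seq = blocks[::-1] if reverse_order else list(blocks)
--     if not interleave:
--         return [x for b in seq for x in b]
--     # Decorate–sort–undecorate: give every element the single sort key
--     # row*n + rotated_rank and let one stable sort produce the interleaving;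
--     # no per-row scanning and no explicit rotation of the list is needed.
--     n = len(seq)
--     k = int(round_seed) % n if n else 0
--     decorated = []
--     for pos, b in enumerate(seq):
--         rank = (pos - k) % n
--         for i, x in enumerate(b):
--             decorated.append((i * n + rank, x))
--     decorated.sort(key=lambda t: t[0])
--     return [x for _, x in decorated]
-- ===== Notes on version B (the rewrite author's own statement) =====
-- stated objective: alternative
-- what changed: B replaces A's row-by-row double loop over maxlen rows by decorate-sort-undecorate: every element gets the single integer key row*n + rotated_rank in one pass over the blocks, one stable sort by that key produces the interleaving, so there is no per-row rescan and no rotation of an order list.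
import Mathlib
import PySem

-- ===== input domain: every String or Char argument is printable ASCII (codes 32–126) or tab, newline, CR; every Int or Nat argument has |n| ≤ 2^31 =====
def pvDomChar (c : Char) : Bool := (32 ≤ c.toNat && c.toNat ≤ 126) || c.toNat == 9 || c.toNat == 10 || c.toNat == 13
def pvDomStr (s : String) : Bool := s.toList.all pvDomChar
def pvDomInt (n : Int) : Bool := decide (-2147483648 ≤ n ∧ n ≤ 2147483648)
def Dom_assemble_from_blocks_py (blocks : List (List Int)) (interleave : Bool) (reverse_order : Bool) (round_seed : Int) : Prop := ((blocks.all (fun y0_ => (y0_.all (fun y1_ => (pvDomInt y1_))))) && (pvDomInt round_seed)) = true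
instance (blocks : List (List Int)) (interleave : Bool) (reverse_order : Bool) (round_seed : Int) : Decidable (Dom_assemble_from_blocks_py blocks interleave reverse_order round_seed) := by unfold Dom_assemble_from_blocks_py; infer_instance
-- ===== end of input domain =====

-- B re-implements _assemble_from_blocks by decorate-sort-undecorate: each element is keyed
-- by row*n + rotated_rank and one stable sort yields the interleaving (alternative algorithm).
-- ===== PORT A =====
-- Port of A: Python `_assemble_from_blocks` (Source A), literal transliteration.
-- All indices handled here (order idx into blocks, i into blk) are in range by
-- construction, so Nat getD matches Python indexing exactly; Python's
-- `round_seed % len(order)` is PySem.Int.mod (floor mod, nonnegative here).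
def assemble_from_blocks_py (blocks : List (List Int)) (interleave : Bool) (reverse_order : Bool) (round_seed : Int) : List Int :=
  if !interleave then
    let bs := if reverse_order then blocks.reverse else blocks
    bs.foldl (fun S blk => S ++ blk) []
  else
    let maxlen := (blocks.map List.length).foldl max 0
    let order0 := List.range blocks.length
    let order1 := if reverse_order then order0.reverse else order0
    let order := if order1 = [] then order1 else
      let krot := (PySem.Int.mod round_seed (order1.length : Int)).toNat
      order1.drop krot ++ order1.take krot
    (List.range maxlen).foldl (fun S i =>
      order.foldl (fun S idx =>
        let blk := blocks.getD idx []
        if i < blk.length then S ++ [blk.getD i 0] else S) S) []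

-- ===== PORT B =====
-- Port of B (Source B): key every element with row*n + rotated_rank in one pass over
-- enumerate(seq) (the inner `for i, x in enumerate(b)` append loop is the map),
-- then one sort by the key and a projection; `%` is PySem.Int.mod (floor mod).
def assemble_from_blocks_py_alt (blocks : List (List Int)) (interleave : Bool) (reverse_order : Bool) (round_seed : Int) : List Int :=
  let seq := if reverse_order then blocks.reverse else blocks
  if !interleave then
    seq.flatMap (fun b => b)
  else
    let n := seq.length
    let k : Int := if n = 0 then 0 else PySem.Int.mod round_seed (n : Int)
    let decorated := (PySem.List.enumerate seq).foldl (fun acc pb =>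
      acc ++ (PySem.List.enumerate pb.2).map
        (fun ix => (ix.1 * (n : Int) + PySem.Int.mod (pb.1 - k) (n : Int), ix.2))) []
    (PySem.List.sorted decorated (fun t => t.1)).map (fun t => t.2)

-- ===== PRECONDITION & SPEC =====
def Spec_assemble_from_blocks_py (blocks : List (List Int)) (interleave : Bool) (reverse_order : Bool) (round_seed : Int) (out : List Int) : Prop := out = assemble_from_blocks_py_alt blocks interleave reverse_order round_seed
instance (blocks : List (List Int)) (interleave : Bool) (reverse_order : Bool) (round_seed : Int) (out : List Int) : Decidable (Spec_assemble_from_blocks_py blocks interleave reverse_order round_seed out) := by unfold Spec_assemble_from_blocks_py; infer_instance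

-- ===== CLAIM (what is proved, stated in full; the proofs are below) =====
def Claim_equal_assemble_from_blocks_py : Prop := ∀ (blocks : List (List Int)) (interleave : Bool) (reverse_order : Bool) (round_seed : Int), Dom_assemble_from_blocks_py blocks interleave reverse_order round_seed → Spec_assemble_from_blocks_py blocks interleave reverse_order round_seed (assemble_from_blocks_py blocks interleave reverse_order round_seed)

-- ===== LEMMAS AND PROOFS =====

-- row i of the interleaved output, as produced from a (rotated) block list
def pvRowAt (seq : List (List Int)) (i : Nat) : List Int :=
  (seq.filter (fun b => decide (i < b.length))).map (fun b => b.getD i 0)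

-- decorated row i: elements of row i with their sort keys i*n + position
def pvRowK (sr : List (List Int)) (n : Nat) (i : Nat) : List (Int × Int) :=
  ((PySem.List.enumerate sr).filter (fun jb => decide (i < jb.2.length))).map
    (fun jb => ((i : Int) * (n : Int) + jb.1, jb.2.getD i 0))

-- the decorated output in target (sorted) order: row after row
def pvT (sr : List (List Int)) (n maxlen : Nat) : List (Int × Int) :=
  (List.range maxlen).flatMap (pvRowK sr n)

-- the decorated list as B builds it: block after block
def pvD (seq : List (List Int)) (n : Nat) (k : Int) : List (Int × Int) :=
  (PySem.List.enumerate seq).flatMap (fun pb =>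
    (PySem.List.enumerate pb.2).map (fun ix => (ix.1 * (n : Int) + (pb.1 - k) % (n : Int), ix.2)))

lemma map_getD_range {A : Type} (l : List A) (d : A) : (List.range l.length).map (fun i => l.getD i d) = l := by
  apply List.ext_getElem
  · simp
  · intro i h1 h2
    simp [List.getD, List.getElem?_eq_getElem h2]

lemma foldl_rows (seq : List (List Int)) (l : List Nat) : ∀ S : List Int,
    l.foldl (fun S i => seq.foldl (fun S b => if i < b.length then S ++ [b.getD i 0] else S) S) S
      = S ++ l.flatMap (pvRowAt seq) := by
  induction l with
  | nil => simp
  | cons j t ih =>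
    intro S
    have hin : seq.foldl (fun S b => if j < b.length then S ++ [b.getD j 0] else S) S
        = S ++ pvRowAt seq j := by
      have := PySem.List.foldl_append_if (fun b : List Int => decide (j < b.length))
        (fun b => b.getD j 0) seq S
      simpa [pvRowAt] using this
    simp only [List.foldl_cons, hin, ih, List.flatMap_cons, List.append_assoc]

-- A's inner foldl over `order` equals the same foldl over the fetched blocks
lemma inner_foldl_map (blocks : List (List Int)) (order : List Nat) (i : Nat) (S : List Int) :
    order.foldl (fun S idx =>
        let blk := blocks.getD idx []
        if i < blk.length then S ++ [blk.getD i 0] else S) S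
      = (order.map (fun idx => blocks.getD idx [])).foldl
          (fun S b => if i < b.length then S ++ [b.getD i 0] else S) S := by
  rw [List.foldl_map]

-- projecting the values out of a decorated row gives the plain row
lemma enum_filter_map_snd (i : Nat) : ∀ (xs : List (List Int)) (s : Int),
    ((PySem.List.enumerate xs s).filter (fun jb => decide (i < jb.2.length))).map
        (fun jb => jb.2.getD i 0)
      = (xs.filter (fun b => decide (i < b.length))).map (fun b => b.getD i 0) := by
  intro xs
  induction xs with
  | nil => intro s; simp [PySem.List.enumerate_nil]
  | cons b t ih =>
    intro s
    rw [PySem.List.enumerate_cons, List.filter_cons, List.filter_cons]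
    by_cases h : i < b.length
    · simp only [h, decide_true, if_true, List.map_cons, ih]
    · simp only [h, decide_false, Bool.false_eq_true, if_false, ih]

lemma map_snd_pvT (sr : List (List Int)) (n maxlen : Nat) :
    (pvT sr n maxlen).map (fun t => t.2) = (List.range maxlen).flatMap (pvRowAt sr) := by
  rw [pvT, List.map_flatMap]
  apply List.flatMap_congr
  intro i _
  rw [pvRowK, List.map_map, pvRowAt]
  exact enum_filter_map_snd i sr 0

-- rotation: element jj of the rotated list is element (jj + k') % n of the original
lemma rot_getElem? (seq : List (List Int)) (k' jj : Nat) (hk : k' ≤ seq.length) (hj : jj < seq.length) :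
    (seq.drop k' ++ seq.take k')[jj]? = seq[(jj + k') % seq.length]? := by
  rw [List.getElem?_append]
  rw [List.length_drop]
  by_cases h : jj < seq.length - k'
  · rw [if_pos h, List.getElem?_drop]
    have : (jj + k') % seq.length = k' + jj := by
      rw [Nat.add_comm]; exact Nat.mod_eq_of_lt (by omega)
    rw [this]
  · rw [if_neg h, List.getElem?_take]
    rw [if_pos (by omega)]
    have : (jj + k') % seq.length = jj - (seq.length - k') := by
      have h1 : seq.length ≤ jj + k' := by omega
      rw [Nat.mod_eq_sub_mod h1, Nat.mod_eq_of_lt (by omega)]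
      omega
    rw [this]

-- arithmetic of the rank: the rotated position of block (jj + k') % n is jj
lemma emod_rot (n k' jj : Nat) (hk : k' < n) (hj : jj < n) :
    ((((jj + k') % n : Nat) : Int) - (k' : Int)) % (n : Int) = (jj : Int) := by
  by_cases h : jj + k' < n
  · rw [Nat.mod_eq_of_lt h]
    push_cast
    have he : (jj : Int) + k' - k' = (jj : Int) := by ring
    rw [he]
    exact Int.emod_eq_of_lt (by positivity) (by exact_mod_cast hj)
  · have h1 : n ≤ jj + k' := by omega
    rw [Nat.mod_eq_sub_mod h1, Nat.mod_eq_of_lt (by omega)]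
    have hc : (((jj + k' - n : Nat) : Int)) - (k' : Int) = (jj : Int) - n := by
      have hcc : ((jj + k' - n : Nat) : Int) = (jj : Int) + k' - n := by
        omega
      rw [hcc]; ring
    rw [hc, Int.sub_emod_right]
    exact Int.emod_eq_of_lt (by positivity) (by exact_mod_cast hj)

-- …and back: block pp sits at rotated position ((pp - k') mod n)
lemma rot_inv (n k' pp : Nat) (hk : k' < n) (hp : pp < n) :
    (((pp : Int) - (k' : Int)) % (n : Int)).toNat < n ∧
      ((((pp : Int) - (k' : Int)) % (n : Int)).toNat + k') % n = pp := by
  by_cases h : k' ≤ pp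
  · have he : ((pp : Int) - k') % (n : Int) = (pp : Int) - k' :=
      Int.emod_eq_of_lt (by omega) (by omega)
    rw [he]
    have ht : ((pp : Int) - (k' : Int)).toNat = pp - k' := by omega
    rw [ht]
    refine ⟨by omega, ?_⟩
    rw [Nat.sub_add_cancel h]; exact Nat.mod_eq_of_lt hp
  · have he : ((pp : Int) - k') % (n : Int) = (pp : Int) - k' + n := by
      rw [← Int.add_emod_right]
      exact Int.emod_eq_of_lt (by omega) (by omega)
    rw [he]
    have ht : ((pp : Int) - (k' : Int) + n).toNat = pp + n - k' := by omega
    rw [ht]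
    refine ⟨by omega, ?_⟩
    have hx : pp + n - k' + k' = pp + n := by omega
    rw [hx, Nat.add_mod_right]
    exact Nat.mod_eq_of_lt hp

-- membership in the block-major decorated list
lemma mem_pvD_iff (seq : List (List Int)) (n : Nat) (k : Int) (p : Int × Int) :
    p ∈ pvD seq n k ↔ ∃ pp : Nat, ∃ _ : pp < seq.length, ∃ ii : Nat, ∃ _ : ii < seq[pp].length,
      p = ((ii : Int) * (n : Int) + ((pp : Int) - k) % (n : Int), seq[pp][ii]) := by
  simp only [pvD, List.mem_flatMap, List.mem_map, PySem.List.mem_enumerate_iff]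
  constructor
  · rintro ⟨pb, ⟨pp, hpp, rfl⟩, ix, ⟨ii, hii, rfl⟩, rfl⟩
    exact ⟨pp, hpp, ii, hii, by simp⟩
  · rintro ⟨pp, hpp, ii, hii, rfl⟩
    exact ⟨((pp : Int), seq[pp]), ⟨pp, hpp, by simp⟩,
      ⟨((ii : Int), seq[pp][ii]), ⟨ii, hii, by simp⟩, by simp⟩⟩

-- membership in the row-major decorated list
lemma mem_pvT_iff (sr : List (List Int)) (n maxlen : Nat) (p : Int × Int) :
    p ∈ pvT sr n maxlen ↔ ∃ i : Nat, i < maxlen ∧ ∃ jj : Nat, ∃ _ : jj < sr.length,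
      i < sr[jj].length ∧ p = ((i : Int) * (n : Int) + (jj : Int), sr[jj].getD i 0) := by
  simp only [pvT, pvRowK, List.mem_flatMap, List.mem_range, List.mem_map, List.mem_filter,
    PySem.List.mem_enumerate_iff, decide_eq_true_eq]
  constructor
  · rintro ⟨i, hi, jb, ⟨⟨jj, hjj, rfl⟩, hlen⟩, rfl⟩
    exact ⟨i, hi, jj, hjj, by simpa using hlen, by simp⟩
  · rintro ⟨i, hi, jj, hjj, hlen, rfl⟩
    exact ⟨i, hi, ((jj : Int), sr[jj]), ⟨⟨jj, hjj, by simp⟩, hlen⟩, by simp⟩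

-- key bounds of decorated row i
lemma pvRowK_key_bounds (sr : List (List Int)) (n i : Nat) (hn : sr.length = n) :
    ∀ p ∈ pvRowK sr n i, (i : Int) * n ≤ p.1 ∧ p.1 < ((i : Int) + 1) * n := by
  intro p hp
  rw [pvRowK, List.mem_map] at hp
  obtain ⟨jb, hjb, rfl⟩ := hp
  have hmem := List.mem_of_mem_filter hjb
  rw [PySem.List.mem_enumerate_iff] at hmem
  obtain ⟨jj, hjj, rfl⟩ := hmem
  simp only [Int.zero_add]
  have hjn : (jj : Int) < n := by exact_mod_cast hn ▸ hjj
  have h0 : (0 : Int) ≤ jj := by positivity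
  constructor
  · exact le_add_of_nonneg_right h0
  · have hx : ((i : Int) + 1) * n = (i : Int) * n + n := by ring
    rw [hx]
    linarith

-- the row-major decorated list is strictly increasing in the key
lemma pairwise_pvT (sr : List (List Int)) (n maxlen : Nat) (hn : sr.length = n) :
    (pvT sr n maxlen).Pairwise (fun a b => a.1 < b.1) := by
  rw [pvT, List.pairwise_flatMap]
  constructor
  · intro i _
    rw [pvRowK]
    refine List.Pairwise.map _ ?_
      (List.Pairwise.filter _ (PySem.List.pairwise_lt_enumerate sr 0))
    intro a b h
    simp only []
    linarith
  · apply List.Pairwise.imp ?_ (List.pairwise_lt_range)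
    intro i j hij x hx y hy
    have hxb := pvRowK_key_bounds sr n i hn x hx
    have hyb := pvRowK_key_bounds sr n j hn y hy
    have h1 : ((i : Int) + 1) * n ≤ (j : Int) * n := by
      apply mul_le_mul_of_nonneg_right _ (by positivity)
      have : (i : Int) < j := by exact_mod_cast hij
      omega
    calc x.1 < ((i : Int) + 1) * n := hxb.2
      _ ≤ (j : Int) * n := h1
      _ ≤ y.1 := hyb.1

-- the key of a decorated element determines its rank mod n
lemma key_emod (ii n r : Int) (h0 : 0 ≤ r) (h1 : r < n) :
    (ii * n + r) % n = r := by
  rw [add_comm, mul_comm, Int.add_mul_emod_self_left]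
  exact Int.emod_eq_of_lt h0 h1

-- the block-major decorated list has pairwise distinct keys
lemma pairwise_pvD (seq : List (List Int)) (n : Nat) (k : Int) (hn : seq.length = n)
    (hn0 : 0 < n) (hk0 : 0 ≤ k) (hk1 : k < n) :
    (pvD seq n k).Pairwise (fun a b => a.1 ≠ b.1) := by
  rw [pvD, List.pairwise_flatMap]
  have hnz : (n : Int) ≠ 0 := by exact_mod_cast hn0.ne'
  constructor
  · intro pb _
    refine List.Pairwise.map _ ?_ (PySem.List.pairwise_lt_enumerate pb.2 0)
    intro a b h heq
    simp only [] at heq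
    have h2 : a.1 * (n : Int) = b.1 * n := by linarith
    have h3 : a.1 = b.1 := mul_right_cancel₀ hnz h2
    omega
  · apply List.Pairwise.imp_of_mem ?_ (PySem.List.pairwise_lt_enumerate seq 0)
    intro pb qb hpb hqb hlt x hx y hy heq
    rw [List.mem_map] at hx hy
    obtain ⟨ix, _, rfl⟩ := hx
    obtain ⟨iy, _, rfl⟩ := hy
    rw [PySem.List.mem_enumerate_iff] at hpb hqb
    obtain ⟨pp, hpp, rfl⟩ := hpb
    obtain ⟨qq, hqq, rfl⟩ := hqb
    simp only [Int.zero_add] at hlt heq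
    have hppn : pp < n := hn ▸ hpp
    have hqqn : qq < n := hn ▸ hqq
    set rp : Int := ((pp : Int) - k) % (n : Int) with hrp
    set rq : Int := ((qq : Int) - k) % (n : Int) with hrq
    have hrp0 : 0 ≤ rp := Int.emod_nonneg _ hnz
    have hrp1 : rp < n := Int.emod_lt_of_pos _ (by exact_mod_cast hn0)
    have hrq0 : 0 ≤ rq := Int.emod_nonneg _ hnz
    have hrq1 : rq < n := Int.emod_lt_of_pos _ (by exact_mod_cast hn0)
    -- equal keys force equal ranks
    have hreq : rp = rq := by
      have e1 : (ix.1 * (n : Int) + rp) % n = rp := key_emod _ _ _ hrp0 hrp1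
      have e2 : (iy.1 * (n : Int) + rq) % n = rq := key_emod _ _ _ hrq0 hrq1
      rw [← e1, ← e2, heq]
    -- equal ranks force equal blocks, contradicting pp < qq
    set k' : Nat := k.toNat with hk'
    have hkk : (k' : Int) = k := Int.toNat_of_nonneg hk0
    have hk'n : k' < n := by omega
    have h1 := rot_inv n k' pp hk'n hppn
    have h2 := rot_inv n k' qq hk'n hqqn
    rw [hkk] at h1 h2
    have : pp = qq := by
      rw [← h1.2, ← h2.2, ← hrp, ← hrq, hreq]
    omega

-- main equivalence
theorem assemble_from_blocks_py_spec_aux :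
    ∀ (blocks : List (List Int)) (interleave : Bool) (reverse_order : Bool) (round_seed : Int),
    assemble_from_blocks_py blocks interleave reverse_order round_seed
      = assemble_from_blocks_py_alt blocks interleave reverse_order round_seed := by
  intro blocks interleave reverse_order round_seed
  by_cases hbe : blocks = []
  · subst hbe
    cases interleave <;> cases reverse_order <;> rfl
  unfold assemble_from_blocks_py assemble_from_blocks_py_alt
  by_cases hi : interleave = true
  swap
  · -- non-interleaved: concatenation both sides
    simp only [Bool.not_eq_true] at hi
    subst hi
    simp only [Bool.not_false, if_true]
    rw [PySem.List.foldl_append_eq_flatMap (fun b => b) _ []]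
    simp
  subst hi
  simp only [Bool.not_true, Bool.false_eq_true, if_false]
  set seq0 : List (List Int) := if reverse_order then blocks.reverse else blocks with hseq0
  set n : Nat := seq0.length with hn
  have hlen0 : seq0.length = blocks.length := by
    rw [hseq0]; by_cases hr : reverse_order = true <;> simp [hr]
  have hn0 : 0 < n := by
    rw [hn, hlen0]
    exact List.length_pos_of_ne_nil hbe
  set k : Int := PySem.Int.mod round_seed (n : Int) with hk
  have hpos : (0 : Int) < n := by exact_mod_cast hn0
  have hke : k = round_seed % (n : Int) := PySem.Int.mod_eq_emod_of_pos hpos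
  have hk0 : 0 ≤ k := by rw [hke]; exact Int.emod_nonneg _ (by omega)
  have hk1 : k < n := by rw [hke]; exact Int.emod_lt_of_pos _ hpos
  set k' : Nat := k.toNat with hk'
  have hkk : (k' : Int) = k := Int.toNat_of_nonneg hk0
  have hk'n : k' < n := by omega
  set seqA : List (List Int) := seq0.drop k' ++ seq0.take k' with hseqA
  have hlenA : seqA.length = n := by
    rw [hseqA]; simp; omega
  set maxlen : Nat := (blocks.map List.length).foldl max 0 with hmaxlen
  have hmaxb : ∀ b ∈ seq0, b.length ≤ maxlen := by
    intro b hb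
    have hbb : b ∈ blocks := by
      rw [hseq0] at hb
      by_cases hr : reverse_order = true
      · rw [if_pos hr] at hb; exact List.mem_reverse.mp hb
      · rwa [if_neg hr] at hb
    exact ((PySem.List.le_foldl_max (blocks.map List.length) 0).2) _
      (List.mem_map_of_mem hbb)
  -- ==== A equals the rows of the rotated list ====
  have hA : (List.range maxlen).foldl (fun S i =>
        ((if (if reverse_order then (List.range blocks.length).reverse else List.range blocks.length) = []
          then (if reverse_order then (List.range blocks.length).reverse else List.range blocks.length)
          else
            (if reverse_order then (List.range blocks.length).reverse else List.range blocks.length).drop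
              (PySem.Int.mod round_seed
                (((if reverse_order then (List.range blocks.length).reverse else List.range blocks.length).length : Nat) : Int)).toNat ++
            (if reverse_order then (List.range blocks.length).reverse else List.range blocks.length).take
              (PySem.Int.mod round_seed
                (((if reverse_order then (List.range blocks.length).reverse else List.range blocks.length).length : Nat) : Int)).toNat)).foldl
          (fun S idx =>
            let blk := blocks.getD idx []
            if i < blk.length then S ++ [blk.getD i 0] else S) S) []
      = (List.range maxlen).flatMap (pvRowAt seqA) := by
    set g : Nat → List Int := fun idx => blocks.getD idx [] with hg
    set order1 : List Nat :=
      if reverse_order then (List.range blocks.length).reverse else List.range blocks.length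
      with horder1
    have hmap1 : order1.map g = seq0 := by
      rw [horder1, hseq0]
      by_cases hr : reverse_order = true
      · simp only [hr, if_pos, List.map_reverse]
        rw [map_getD_range blocks []]
      · simp only [hr, Bool.false_eq_true, if_neg, if_false]
        exact map_getD_range blocks []
    have hlen1 : order1.length = n := by
      rw [horder1, hn, hlen0]; by_cases hr : reverse_order = true <;> simp [hr]
    have hone : ¬ order1 = [] := by
      intro hc
      rw [hc] at hlen1
      simp at hlen1
      omega
    rw [if_neg hone, hlen1]
    have hmap : (order1.drop k' ++ order1.take k').map g = seqA := by
      rw [hseqA, List.map_append, List.map_drop, List.map_take, hmap1]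
    have hbody : (fun (S : List Int) (i : Nat) => (order1.drop k' ++ order1.take k').foldl
          (fun S idx =>
            let blk := blocks.getD idx []
            if i < blk.length then S ++ [blk.getD i 0] else S) S)
        = (fun S i => seqA.foldl (fun S b => if i < b.length then S ++ [b.getD i 0] else S) S) := by
      funext S i
      rw [inner_foldl_map, hmap]
    rw [← hk', hbody, foldl_rows]
    simp
  rw [hA]
  -- ==== B: the decorated list and its sort ====
  have hbne : ¬ n = 0 := by omega
  rw [if_neg hbne]
  have hdec : (PySem.List.enumerate seq0).foldl (fun acc pb =>
        acc ++ (PySem.List.enumerate pb.2).map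
          (fun ix => (ix.1 * (n : Int) + PySem.Int.mod (pb.1 - k) (n : Int), ix.2))) []
      = pvD seq0 n k := by
    rw [PySem.List.foldl_append_eq_flatMap, List.nil_append, pvD]
    apply List.flatMap_congr
    intro pb _
    apply List.map_congr_left
    intro ix _
    rw [PySem.Int.mod_eq_emod_of_pos hpos]
  rw [hdec]
  -- the sorted decorated list is the row-major one
  have hsort : PySem.List.sorted (pvD seq0 n k) (fun t => t.1) = pvT seqA n maxlen := by
    apply PySem.List.sorted_eq_of_perm_of_pairwise_lt
    · -- permutation, via nodup + same members
      have hndT : (pvT seqA n maxlen).Nodup :=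
        (pairwise_pvT seqA n maxlen hlenA).imp (fun h he => by rw [he] at h; exact lt_irrefl _ h)
      have hndD : (pvD seq0 n k).Nodup :=
        (pairwise_pvD seq0 n k hn.symm hn0 hk0 hk1).imp (fun h he => h (by rw [he]))
      rw [List.perm_ext_iff_of_nodup hndT hndD]
      intro p
      rw [mem_pvT_iff, mem_pvD_iff]
      constructor
      · rintro ⟨i, _, jj, hjj, hlen, rfl⟩
        have hjjn : jj < n := hlenA ▸ hjj
        set pp : Nat := (jj + k') % n with hpp
        have hppn : pp < n := Nat.mod_lt _ hn0
        have hppl : pp < seq0.length := by omega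
        have hget : seqA[jj] = seq0[pp] := by
          have h1 := rot_getElem? seq0 k' jj (by omega) (by omega)
          rw [← hn] at h1
          rw [← hseqA] at h1
          rw [List.getElem?_eq_getElem hjj, List.getElem?_eq_getElem hppl] at h1
          exact Option.some.inj h1
        have hkey : ((pp : Int) - k) % (n : Int) = (jj : Int) := by
          rw [← hkk, hpp]
          exact emod_rot n k' jj hk'n hjjn
        have hlen' : i < seq0[pp].length := by rw [← hget]; exact hlen
        refine ⟨pp, hppl, i, hlen', ?_⟩
        rw [hkey]
        congr 1
        rw [hget]
        exact List.getD_eq_getElem _ _ hlen'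
      · rintro ⟨pp, hppl, ii, hii, rfl⟩
        have hppn : pp < n := by omega
        set jjI : Int := ((pp : Int) - k) % (n : Int) with hjjI
        have hri := rot_inv n k' pp hk'n hppn
        rw [hkk] at hri
        set jj : Nat := jjI.toNat with hjj
        have hjjn : jj < n := hri.1
        have hjjA : jj < seqA.length := by omega
        have hget : seqA[jj] = seq0[pp] := by
          have h1 := rot_getElem? seq0 k' jj (by omega) (by omega)
          rw [← hn, ← hseqA] at h1
          rw [hri.2] at h1
          rw [List.getElem?_eq_getElem hjjA, List.getElem?_eq_getElem hppl] at h1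
          exact Option.some.inj h1
        have hjjc : (jj : Int) = jjI := by
          rw [hjj]
          exact Int.toNat_of_nonneg (Int.emod_nonneg _ (by omega))
        refine ⟨ii, ?_, jj, hjjA, by rw [hget]; exact hii, ?_⟩
        · have := hmaxb seq0[pp] (List.getElem_mem hppl)
          omega
        · congr 1
          · rw [hjjc]
          · rw [hget]
            exact (List.getD_eq_getElem _ _ hii).symm
    · exact pairwise_pvT seqA n maxlen hlenA
  rw [hsort, map_snd_pvT]

-- ===== VERDICT (by name: the statement is the Claim_ definition above) =====
theorem assemble_from_blocks_py_spec : Claim_equal_assemble_from_blocks_py := by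
  intro blocks interleave reverse_order round_seed _hdom
  unfold Spec_assemble_from_blocks_py
  exact assemble_from_blocks_py_spec_aux blocks interleave reverse_order round_seed
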